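-- pv_equiv track=rewrite | github.com/BiNEL-SNU/SARS-CoV-2 | IP_preprocessing/utils/SeqUtil.py | to_bitstream
-- ===== SOURCE A (Python) =====
-- def to_bitstream(dna_sequence: str):
--     stream1 = 0x00
--     stream2 = 0x00
--     for nucl in dna_sequence:
--         if nucl == "A":
--             pass
--         elif nucl == "G":
--             stream1 += 1
--         elif nucl == "C":
--             stream2 += 1
--         elif nucl == "T":
--             stream1 += 1
--             stream2 += 1
--         else:
--             return None
--         stream1 = stream1 << 1
--         stream2 = stream2 << 1
--     return stream1, stream2
-- ===== SOURCE B (Python) =====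
-- _BITS = {"A": ("0", "0"), "G": ("1", "0"), "C": ("0", "1"), "T": ("1", "1")}
--
-- def to_bitstream(dna_sequence: str):
--     s1 = []
--     s2 = []
--     for nucl in dna_sequence:
--         pair = _BITS.get(nucl)
--         if pair is None:
--             return None
--         s1.append(pair[0])
--         s2.append(pair[1])
--     return int("".join(s1) + "0", 2), int("".join(s2) + "0", 2)
-- ===== Notes on version B (the rewrite author's own statement) =====
-- stated objective: idiomatic
-- what changed: Replaces the shift-and-increment integer accumulation with a dict lookup building two bit-strings in one pass, converted once at the end by a base-2 int() parse with a trailing zero bit that realises the final left-shift.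
import Mathlib
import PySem

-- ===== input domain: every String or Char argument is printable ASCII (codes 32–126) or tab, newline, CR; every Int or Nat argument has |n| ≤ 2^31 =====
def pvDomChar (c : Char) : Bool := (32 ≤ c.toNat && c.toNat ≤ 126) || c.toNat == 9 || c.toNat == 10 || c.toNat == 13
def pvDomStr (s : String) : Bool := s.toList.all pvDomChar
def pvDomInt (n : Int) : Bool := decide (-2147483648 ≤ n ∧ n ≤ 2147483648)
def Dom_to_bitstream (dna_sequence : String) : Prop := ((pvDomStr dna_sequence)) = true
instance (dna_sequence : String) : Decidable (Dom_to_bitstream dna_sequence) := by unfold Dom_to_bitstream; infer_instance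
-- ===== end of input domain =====

-- B builds two bit-strings via a dict lookup and converts them once by a base-2 int() parse
-- with a trailing zero bit, instead of A's per-character shift-and-increment accumulation (idiomatic).

-- ===== PORT A =====
-- A's loop: shift-and-increment accumulation over the characters, early None on an invalid one.
def pvALoop (cs : List Char) (stream1 stream2 : Int) : Option (Int × Int) :=
  match cs with
  | [] => some (stream1, stream2)
  | nucl :: rest =>
    if nucl = 'A' then pvALoop rest (stream1 <<< 1) (stream2 <<< 1)
    else if nucl = 'G' then pvALoop rest ((stream1 + 1) <<< 1) (stream2 <<< 1)
    else if nucl = 'C' then pvALoop rest (stream1 <<< 1) ((stream2 + 1) <<< 1)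
    else if nucl = 'T' then pvALoop rest ((stream1 + 1) <<< 1) ((stream2 + 1) <<< 1)
    else none

def to_bitstream (dna_sequence : String) : Option (Int × Int) :=
  pvALoop dna_sequence.toList 0 0

-- ===== PORT B =====
-- the dict {"A": ("0","0"), "G": ("1","0"), "C": ("0","1"), "T": ("1","1")}
def pvBits : PySem.Dict Char (Char × Char) :=
  PySem.Dict.ofList [('A', ('0', '0')), ('G', ('1', '0')), ('C', ('0', '1')), ('T', ('1', '1'))]

-- B's loop: append the looked-up bit-characters to the two accumulators; None on a missing key.
def pvBLoop (cs : List Char) (s1 s2 : List Char) : Option (List Char × List Char) :=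
  match cs with
  | [] => some (s1, s2)
  | nucl :: rest =>
    match PySem.Dict.get? pvBits nucl with
    | none => none
    | some pair => pvBLoop rest (s1 ++ [pair.1]) (s2 ++ [pair.2])

-- int(s, 2) on a string of '0'/'1' characters
def pvBin (s : List Char) : Int :=
  s.foldl (fun a c => 2 * a + (if c = '1' then 1 else 0)) 0

def to_bitstream_alt (dna_sequence : String) : Option (Int × Int) :=
  match pvBLoop dna_sequence.toList [] [] with
  | none => none
  | some (s1, s2) => some (pvBin (s1 ++ ['0']), pvBin (s2 ++ ['0']))

-- ===== PRECONDITION & SPEC =====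
def Spec_to_bitstream (dna_sequence : String) (out : Option (Int × Int)) : Prop := out = to_bitstream_alt dna_sequence
instance (dna_sequence : String) (out : Option (Int × Int)) : Decidable (Spec_to_bitstream dna_sequence out) := by unfold Spec_to_bitstream; infer_instance

-- ===== CLAIM (what is proved, stated in full; the proofs are below) =====
def Claim_equal_to_bitstream : Prop := ∀ (dna_sequence : String), Dom_to_bitstream dna_sequence → Spec_to_bitstream dna_sequence (to_bitstream dna_sequence)

-- ===== LEMMAS AND PROOFS =====

theorem pvShl (a : Int) : a <<< (1 : Int) = 2 * a := by
  simpa [mul_comm] using Int.shiftLeft_eq_mul_pow a 1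

theorem pvBin_append0 (s : List Char) : pvBin (s ++ ['0']) = 2 * pvBin s := by
  simp [pvBin, List.foldl_append]

theorem pvBin_append1 (s : List Char) : pvBin (s ++ ['1']) = 2 * pvBin s + 1 := by
  simp [pvBin, List.foldl_append]

theorem pvBits_A : PySem.Dict.get? pvBits 'A' = some ('0', '0') := by decide
theorem pvBits_G : PySem.Dict.get? pvBits 'G' = some ('1', '0') := by decide
theorem pvBits_C : PySem.Dict.get? pvBits 'C' = some ('0', '1') := by decide
theorem pvBits_T : PySem.Dict.get? pvBits 'T' = some ('1', '1') := by decide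

theorem pvBits_mk : pvBits = PySem.Dict.mk
    [('A', ('0', '0')), ('G', ('1', '0')), ('C', ('0', '1')), ('T', ('1', '1'))] := by decide

theorem pvBits_none (c : Char) (hA : c ≠ 'A') (hG : c ≠ 'G') (hC : c ≠ 'C') (hT : c ≠ 'T') :
    PySem.Dict.get? pvBits c = none := by
  rw [pvBits_mk]
  simp [PySem.Dict.get?, Ne.symm hA, Ne.symm hG, Ne.symm hC, Ne.symm hT]

theorem pvShift0 (s : List Char) : (2 * pvBin s) <<< (1 : Int) = 2 * pvBin (s ++ ['0']) := by
  rw [pvShl, pvBin_append0]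

theorem pvShift1 (s : List Char) : (2 * pvBin s + 1) <<< (1 : Int) = 2 * pvBin (s ++ ['1']) := by
  rw [pvShl, pvBin_append1]

-- the loop invariant: A's integer accumulators are twice the binary value of B's bit-strings
theorem pvLoop_eq (cs : List Char) : ∀ (s1 s2 : List Char),
    pvALoop cs (2 * pvBin s1) (2 * pvBin s2)
      = (pvBLoop cs s1 s2).map (fun p => (2 * pvBin p.1, 2 * pvBin p.2)) := by
  induction cs with
  | nil => intro s1 s2; simp [pvALoop, pvBLoop]
  | cons c rest ih =>
    intro s1 s2
    by_cases hA : c = 'A'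
    · subst hA
      calc pvALoop ('A' :: rest) (2 * pvBin s1) (2 * pvBin s2)
          = pvALoop rest ((2 * pvBin s1) <<< 1) ((2 * pvBin s2) <<< 1) := by simp [pvALoop]
        _ = pvALoop rest (2 * pvBin (s1 ++ ['0'])) (2 * pvBin (s2 ++ ['0'])) := by
              rw [pvShift0, pvShift0]
        _ = (pvBLoop rest (s1 ++ ['0']) (s2 ++ ['0'])).map
              (fun p => (2 * pvBin p.1, 2 * pvBin p.2)) := ih _ _
        _ = (pvBLoop ('A' :: rest) s1 s2).map (fun p => (2 * pvBin p.1, 2 * pvBin p.2)) := by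
              simp [pvBLoop, pvBits_A]
    · by_cases hG : c = 'G'
      · subst hG
        calc pvALoop ('G' :: rest) (2 * pvBin s1) (2 * pvBin s2)
            = pvALoop rest ((2 * pvBin s1 + 1) <<< 1) ((2 * pvBin s2) <<< 1) := by simp [pvALoop]
          _ = pvALoop rest (2 * pvBin (s1 ++ ['1'])) (2 * pvBin (s2 ++ ['0'])) := by
                rw [pvShift1, pvShift0]
          _ = (pvBLoop rest (s1 ++ ['1']) (s2 ++ ['0'])).map
                (fun p => (2 * pvBin p.1, 2 * pvBin p.2)) := ih _ _
          _ = (pvBLoop ('G' :: rest) s1 s2).map (fun p => (2 * pvBin p.1, 2 * pvBin p.2)) := by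
                simp [pvBLoop, pvBits_G]
      · by_cases hC : c = 'C'
        · subst hC
          calc pvALoop ('C' :: rest) (2 * pvBin s1) (2 * pvBin s2)
              = pvALoop rest ((2 * pvBin s1) <<< 1) ((2 * pvBin s2 + 1) <<< 1) := by simp [pvALoop]
            _ = pvALoop rest (2 * pvBin (s1 ++ ['0'])) (2 * pvBin (s2 ++ ['1'])) := by
                  rw [pvShift0, pvShift1]
            _ = (pvBLoop rest (s1 ++ ['0']) (s2 ++ ['1'])).map
                  (fun p => (2 * pvBin p.1, 2 * pvBin p.2)) := ih _ _
            _ = (pvBLoop ('C' :: rest) s1 s2).map (fun p => (2 * pvBin p.1, 2 * pvBin p.2)) := by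
                  simp [pvBLoop, pvBits_C]
        · by_cases hT : c = 'T'
          · subst hT
            calc pvALoop ('T' :: rest) (2 * pvBin s1) (2 * pvBin s2)
                = pvALoop rest ((2 * pvBin s1 + 1) <<< 1) ((2 * pvBin s2 + 1) <<< 1) := by
                    simp [pvALoop]
              _ = pvALoop rest (2 * pvBin (s1 ++ ['1'])) (2 * pvBin (s2 ++ ['1'])) := by
                    rw [pvShift1, pvShift1]
              _ = (pvBLoop rest (s1 ++ ['1']) (s2 ++ ['1'])).map
                    (fun p => (2 * pvBin p.1, 2 * pvBin p.2)) := ih _ _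
              _ = (pvBLoop ('T' :: rest) s1 s2).map (fun p => (2 * pvBin p.1, 2 * pvBin p.2)) := by
                    simp [pvBLoop, pvBits_T]
          · simp [pvALoop, pvBLoop, hA, hG, hC, hT, pvBits_none c hA hG hC hT]

-- ===== VERDICT (by name: the statement is the Claim_ definition above) =====
theorem to_bitstream_spec : Claim_equal_to_bitstream := by
  intro s _
  show to_bitstream s = to_bitstream_alt s
  unfold to_bitstream to_bitstream_alt
  have h0 : (0 : Int) = 2 * pvBin [] := by simp [pvBin]
  rw [h0, pvLoop_eq]
  cases h : pvBLoop s.toList [] [] with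
  | none => rfl
  | some p =>
    obtain ⟨s1, s2⟩ := p
    simp [pvBin_append0]
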